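-- pv_equiv track=rewrite | github.com/micahkberg/advent-of-code-2020 | code-14-0.py | flicker
-- ===== SOURCE A (Python) =====
-- import itertools
--
-- def flicker(bin_num):
--     output_nums = []
--     xs = bin_num.count("X")
--
--     variations = itertools.product(["1","0"],repeat=xs)
--
--     for variation in variations:
--         new_num = ""
--         count = 0
--         for i in bin_num:
--             if i != "X":
--                 new_num += i
--             else:
--                 new_num += variation[count]
--                 count+=1
--         output_nums.append(new_num)
--     return output_nums
-- ===== SOURCE B (Python) =====
-- def flicker(bin_num):
--     parts = bin_num.split("X")
--     outs = [parts[0]]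
--     for part in parts[1:]:
--         outs = [p + d + part for p in outs for d in "10"]
--     return outs
-- ===== Notes on version B (the rewrite author's own statement) =====
-- stated objective: faster
-- what changed: Replaced itertools.product over all wildcard positions plus a full character-by-character reassembly of the string for every variation with one split of the string at the wildcards followed by a segment-joining fold, so fixed segments are scanned once instead of once per output.
import Mathlib
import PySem

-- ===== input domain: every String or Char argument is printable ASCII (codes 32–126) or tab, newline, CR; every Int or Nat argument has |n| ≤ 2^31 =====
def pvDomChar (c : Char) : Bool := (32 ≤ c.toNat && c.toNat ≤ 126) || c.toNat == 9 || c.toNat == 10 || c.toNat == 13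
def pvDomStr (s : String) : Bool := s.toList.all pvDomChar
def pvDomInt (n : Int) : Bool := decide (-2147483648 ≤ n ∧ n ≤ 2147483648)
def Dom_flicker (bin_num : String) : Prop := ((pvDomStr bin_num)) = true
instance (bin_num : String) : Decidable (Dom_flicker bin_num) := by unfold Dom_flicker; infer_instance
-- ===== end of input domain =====

-- B replaces itertools.product + a per-variation character-by-character reassembly scan with
-- a single split of the string at the wildcards followed by a segment-joining fold (faster:
-- fixed segments are scanned once, not once per output); same outputs in the same order.

-- ===== PORT A =====
-- itertools.product(["1","0"], repeat=n): leftmost component varies slowest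
def pvProdRep : Nat → List (List Char)
  | 0 => [[]]
  | n + 1 => (['1', '0']).flatMap (fun d => (pvProdRep n).map (fun v => d :: v))

-- the inner 'for i in bin_num' loop of A; state = (new_num, count).
-- variation[count] is always in range (count < number of X's), so the .getD default is never used.
def pvAssembleStep (variation : List Char) (st : List Char × Nat) (i : Char) : List Char × Nat :=
  if i ≠ 'X' then (st.1 ++ [i], st.2)
  else (st.1 ++ [(PySem.List.pyGet? variation (st.2 : Int)).getD 'X'], st.2 + 1)

def flicker (bin_num : String) : List String :=
  let xs := PySem.Str.count bin_num "X"
  let variations := pvProdRep xs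
  variations.map (fun variation =>
    String.ofList (bin_num.toList.foldl (pvAssembleStep variation) ([], 0)).1)

-- ===== PORT B =====
-- bin_num.split("X"); then one fold over the remaining segments:
-- outs = [p + d + part for p in outs for d in "10"]
def flicker_alt (bin_num : String) : List String :=
  let parts : List (List Char) := PySem.Chars.splitOn bin_num.toList ['X']
  let outs0 : List (List Char) := [parts.headD []]   -- parts[0]; split never returns an empty list
  let outs := parts.tail.foldl
    (fun outs part => outs.flatMap (fun p => (['1', '0']).map (fun d => p ++ [d] ++ part))) outs0
  outs.map String.ofList

-- ===== PRECONDITION & SPEC =====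
def Spec_flicker (bin_num : String) (out : List String) : Prop := out = flicker_alt bin_num
instance (bin_num : String) (out : List String) : Decidable (Spec_flicker bin_num out) := by unfold Spec_flicker; infer_instance

-- ===== CLAIM (what is proved, stated in full; the proofs are below) =====
def Claim_equal_flicker : Prop := ∀ (bin_num : String), Dom_flicker bin_num → Spec_flicker bin_num (flicker bin_num)

-- ===== LEMMAS AND PROOFS =====

-- what A's inner loop produces: substitute successive chars of v for the X's of l
def pvRun : List Char → List Char → List Char
  | [], _ => []
  | c :: cs, v => if c = 'X' then v.headD 'X' :: pvRun cs v.tail else c :: pvRun cs v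

-- proof-side bridge: the wildcard expansion as one structural recursion on the char list
def pvFlick : List Char → List (List Char)
  | [] => [[]]
  | c :: cs =>
    let tails := pvFlick cs
    if c = 'X' then (['1', '0']).flatMap (fun d => tails.map (fun t => d :: t))
    else tails.map (fun t => c :: t)

-- split on 'X', recursively (= PySem.Chars.splitOn · ['X'])
def pvSpl : List Char → List (List Char)
  | [] => [[]]
  | c :: cs => if c = 'X' then [] :: pvSpl cs else (pvSpl cs).modifyHead (fun q => c :: q)

-- join a list of segments with one wildcard digit between consecutive segments
def pvG : List (List Char) → List (List Char)
  | [] => [[]]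
  | [p] => [p]
  | p :: ps => (['1', '0']).flatMap (fun d => (pvG ps).map (fun r => p ++ d :: r))

-- same, for the segments to the right of the first one
def pvT : List (List Char) → List (List Char)
  | [] => [[]]
  | part :: rest => (['1', '0']).flatMap (fun d => (pvT rest).map (fun r => d :: (part ++ r)))

-- ---- A-side: flicker = map ofList (pvFlick ·) ----

theorem pv_go_step (n acc : Nat) (c : Char) (cs : List Char) :
    PySem.Chars.count.go ['X'] (n + 1) (c :: cs) acc
    = if c = 'X' then PySem.Chars.count.go ['X'] n cs (acc + 1)
      else PySem.Chars.count.go ['X'] n cs acc := by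
  simp only [PySem.Chars.count.go, List.isPrefixOf, Bool.and_true, List.length_cons]
  by_cases hc : c = 'X'
  · subst hc; simp
  · simp [Ne.symm hc]
    exact fun h => absurd h hc

theorem pv_go_singleton (fuel : Nat) : ∀ (l : List Char) (acc : Nat), l.length ≤ fuel →
    PySem.Chars.count.go ['X'] fuel l acc = acc + l.count 'X' := by
  induction fuel with
  | zero =>
    intro l acc h
    have : l = [] := List.eq_nil_of_length_eq_zero (Nat.le_zero.mp h)
    subst this; simp [PySem.Chars.count.go]
  | succ n ih =>
    intro l acc h
    cases l with
    | nil => simp [PySem.Chars.count.go]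
    | cons c cs =>
      simp only [List.length_cons] at h
      rw [pv_go_step]
      by_cases hc : c = 'X'
      · subst hc
        rw [if_pos rfl, ih cs (acc + 1) (by omega)]
        simp [List.count_cons]; omega
      · rw [if_neg hc, ih cs acc (by omega)]
        simp [List.count_cons, hc]

theorem pv_strcount_eq (s : String) : PySem.Str.count s "X" = s.toList.count 'X' := by
  rw [PySem.Str.count_eq]
  have hx : ("X" : String).toList = ['X'] := rfl
  rw [hx]
  unfold PySem.Chars.count
  simp only [List.isEmpty_cons, Bool.false_eq_true, if_false]
  simpa using pv_go_singleton s.toList.length s.toList 0 le_rfl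

theorem pv_fold_run (l : List Char) : ∀ (v acc : List Char) (n : Nat),
    l.foldl (pvAssembleStep v) (acc, n) = (acc ++ pvRun l (v.drop n), n + l.count 'X') := by
  induction l with
  | nil => intro v acc n; simp [pvRun]
  | cons c cs ih =>
    intro v acc n
    by_cases hc : c = 'X'
    · subst hc
      have hstep : pvAssembleStep v (acc, n) 'X'
          = (acc ++ [(PySem.List.pyGet? v (n : Int)).getD 'X'], n + 1) := by
        simp [pvAssembleStep]
      rw [List.foldl_cons, hstep, ih v _ (n + 1)]
      have h1 : (PySem.List.pyGet? v (n : Int)).getD 'X' = (v.drop n).headD 'X' := by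
        simp [PySem.List.pyGet?_natCast, List.headD_eq_head?_getD, List.head?_drop]
      have h2 : v.drop (n + 1) = (v.drop n).tail := by rw [List.tail_drop]
      simp only [pvRun, if_pos rfl, ← h1, ← h2, Prod.mk.injEq, List.count_cons]
      exact ⟨by simp, by simp; omega⟩
    · have hstep : pvAssembleStep v (acc, n) c = (acc ++ [c], n) := by
        simp [pvAssembleStep, hc]
      rw [List.foldl_cons, hstep, ih v _ n]
      simp only [pvRun, if_neg hc, Prod.mk.injEq, List.count_cons]
      exact ⟨by simp, by simp [hc]⟩

theorem pvRun_cons_X (cs v : List Char) (d : Char) :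
    pvRun ('X' :: cs) (d :: v) = d :: pvRun cs v := by
  simp [pvRun]

theorem pv_flick_eq_run (l : List Char) :
    pvFlick l = (pvProdRep (l.count 'X')).map (fun v => pvRun l v) := by
  induction l with
  | nil => simp [pvFlick, pvProdRep, pvRun]
  | cons c cs ih =>
    by_cases hc : c = 'X'
    · subst hc
      have hcount : ('X' :: cs).count 'X' = cs.count 'X' + 1 := by
        simp
      simp only [pvFlick, ih, hcount, pvProdRep, List.map_flatMap, List.map_map, if_true,
        Function.comp_def, pvRun_cons_X]
    · have hcount : (c :: cs).count 'X' = cs.count 'X' := by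
        simp [List.count_cons, hc]
      simp only [pvFlick, if_neg hc, ih, List.map_map, hcount]
      apply List.map_congr_left
      intro v _
      simp [pvRun, hc]

theorem pv_flicker_eq (s : String) :
    flicker s = (pvFlick s.toList).map String.ofList := by
  unfold flicker
  rw [pv_strcount_eq, pv_flick_eq_run, List.map_map]
  apply List.map_congr_left
  intro v _
  rw [pv_fold_run s.toList v [] 0]
  simp

-- ---- B-side: Chars.splitOn · ['X'] = pvSpl, and the fold joins segments ----

theorem pvSpl_ne_nil (l : List Char) : pvSpl l ≠ [] := by
  induction l with
  | nil => simp [pvSpl]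
  | cons c cs ih =>
    simp only [pvSpl]
    by_cases hc : c = 'X'
    · simp [hc]
    · rw [if_neg hc]
      intro h
      exact ih (by simpa using congrArg List.length h)

theorem pv_split_step (n : Nat) (c : Char) (cs cur : List Char) (acc : List (List Char)) :
    PySem.Chars.splitOn.go ['X'] (n + 1) (c :: cs) cur acc
    = if c = 'X' then PySem.Chars.splitOn.go ['X'] n cs [] (cur.reverse :: acc)
      else PySem.Chars.splitOn.go ['X'] n cs (c :: cur) acc := by
  simp only [PySem.Chars.splitOn.go, List.isPrefixOf, Bool.and_true, List.length_cons]
  by_cases hc : c = 'X'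
  · subst hc; simp
  · simp [Ne.symm hc]
    exact fun h => absurd h hc

theorem pv_split_go (fuel : Nat) : ∀ (l cur : List Char) (acc : List (List Char)),
    l.length ≤ fuel →
    PySem.Chars.splitOn.go ['X'] fuel l cur acc
      = acc.reverse ++ (pvSpl l).modifyHead (fun q => cur.reverse ++ q) := by
  induction fuel with
  | zero =>
    intro l cur acc h
    have : l = [] := List.eq_nil_of_length_eq_zero (Nat.le_zero.mp h)
    subst this
    simp [PySem.Chars.splitOn.go, pvSpl]
  | succ n ih =>
    intro l cur acc h
    cases l with
    | nil => simp [PySem.Chars.splitOn.go, pvSpl]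
    | cons c cs =>
      simp only [List.length_cons] at h
      rw [pv_split_step]
      obtain ⟨q, qs, hq⟩ := List.exists_cons_of_ne_nil (pvSpl_ne_nil cs)
      by_cases hc : c = 'X'
      · subst hc
        rw [if_pos rfl, ih cs [] _ (by omega)]
        simp [pvSpl, hq]
      · rw [if_neg hc, ih cs (c :: cur) acc (by omega)]
        simp [pvSpl, hc, hq]

theorem pv_splitOn_eq (l : List Char) : PySem.Chars.splitOn l ['X'] = pvSpl l := by
  unfold PySem.Chars.splitOn
  rw [pv_split_go (l.length + 1) l [] [] (by omega)]
  obtain ⟨q, qs, hq⟩ := List.exists_cons_of_ne_nil (pvSpl_ne_nil l)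
  simp [hq]

theorem pvG_map_cons (c : Char) (p : List Char) (ps : List (List Char)) :
    pvG ((c :: p) :: ps) = (pvG (p :: ps)).map (fun r => c :: r) := by
  cases ps with
  | nil => simp [pvG]
  | cons q qs => simp [pvG, List.map_flatMap, List.map_map, Function.comp_def]

theorem pv_flick_spl (l : List Char) : pvFlick l = pvG (pvSpl l) := by
  induction l with
  | nil => simp [pvFlick, pvSpl, pvG]
  | cons c cs ih =>
    obtain ⟨q, qs, hq⟩ := List.exists_cons_of_ne_nil (pvSpl_ne_nil cs)
    by_cases hc : c = 'X'
    · subst hc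
      simp only [pvFlick, if_true, ih, pvSpl, hq]
      cases qs with
      | nil => simp [pvG]
      | cons q' qs' => simp [pvG]
    · simp only [pvFlick, if_neg hc, ih, pvSpl, hq, List.modifyHead_cons]
      rw [pvG_map_cons]

theorem pvG_cons₂ (p q : List Char) (qs : List (List Char)) :
    pvG (p :: q :: qs) = (['1', '0']).flatMap (fun d => (pvG (q :: qs)).map (fun r => p ++ d :: r)) := rfl

theorem pvT_cons (part : List Char) (rest : List (List Char)) :
    pvT (part :: rest) = (['1', '0']).flatMap (fun d => (pvT rest).map (fun r => d :: (part ++ r))) := rfl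

theorem pvG_eq_T (ps : List (List Char)) : ∀ (p : List Char),
    pvG (p :: ps) = (pvT ps).map (fun r => p ++ r) := by
  induction ps with
  | nil => intro p; simp [pvG, pvT]
  | cons q qs ih =>
    intro p
    rw [pvG_cons₂, ih q, pvT_cons]
    simp [List.map_flatMap, List.map_map, Function.comp_def]

theorem pv_foldl_T (rest : List (List Char)) : ∀ (outs : List (List Char)),
    rest.foldl
      (fun outs part => outs.flatMap (fun p => (['1', '0']).map (fun d => p ++ [d] ++ part)))
      outs
    = outs.flatMap (fun o => (pvT rest).map (fun r => o ++ r)) := by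
  induction rest with
  | nil => intro outs; simp [pvT]
  | cons part rest' ih =>
    intro outs
    rw [List.foldl_cons, ih]
    simp only [pvT_cons, List.flatMap_assoc, List.flatMap_map, List.map_flatMap, List.map_map,
      Function.comp_def, List.append_assoc, List.cons_append, List.nil_append]

theorem pv_flicker_alt_eq (s : String) :
    flicker_alt s = (pvFlick s.toList).map String.ofList := by
  unfold flicker_alt
  rw [pv_splitOn_eq]
  obtain ⟨q, qs, hq⟩ := List.exists_cons_of_ne_nil (pvSpl_ne_nil s.toList)
  rw [pv_flick_spl, hq]
  simp only [List.headD_cons, List.tail_cons]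
  rw [pv_foldl_T, pvG_eq_T]
  simp

-- ===== VERDICT (by name: the statement is the Claim_ definition above) =====
theorem flicker_spec : Claim_equal_flicker := by
  intro bin_num _
  unfold Spec_flicker
  rw [pv_flicker_eq, pv_flicker_alt_eq]
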